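-- pv_equiv track=rewrite | github.com/rkbhkp/Evolving-A-Keyboard | corpus/2_count.py | letter_count_sans_repeat
-- ===== SOURCE A (Python) =====
-- from typing import TypedDict
--
-- class CountDict(TypedDict):
--     letter: str
--     count: int
--
-- def letter_count_sans_repeat(corpus: str, layout: str) -> CountDict:
--     """
--     Counts letter-frequency in corpus.
--
--     Repeats are "stay" characters,
--     rather than "return to home row characters,
--     thus they incur home-like minimum cost.
--     So, we don't count any run of repeats.
--
--     In this EC, some symbols are movable.
--     Unlike letters, symbols can't be capitalized.
--     To count all symbols, we effectively reverse "capitalize" them.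
--     So, we replace all movable symbols with their "lower-case" counterpart.
--     """
--     corpus = corpus.replace('"', "'")
--     corpus = corpus.replace("<", ".")
--     corpus = corpus.replace(">", ".")
--     corpus = corpus.replace("{", "[")
--     corpus = corpus.replace("}", "]")
--     corpus = corpus.replace("?", "/")
--     corpus = corpus.replace("+", "=")
--     corpus = corpus.replace("_", "-")
--     corpus = corpus.replace(":", ";")
--     char_dict = dict.fromkeys(layout, 0)
--     last_char = ""
--     for character in corpus:
--         cap_char = character.capitalize()
--         if cap_char in layout:
--             if cap_char != last_char:
--                 char_dict[cap_char] += 1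
--                 last_char = cap_char
--     return char_dict
-- ===== SOURCE B (Python) =====
-- from collections import Counter
--
-- _TRANS = str.maketrans('"<>{}?+_:', "'..[]/=-;")
--
-- def letter_count_sans_repeat(corpus: str, layout: str):
--     # A run of equal characters contributes (length) occurrences and (length - 1)
--     # adjacent equal pairs, so runs = occurrences - adjacent-equal pairs.
--     filtered = [c.capitalize() for c in corpus.translate(_TRANS)
--                 if c.capitalize() in layout]
--     total = Counter(filtered)
--     dups = Counter(a for a, b in zip(filtered, filtered[1:]) if a == b)
--     return {k: total[k] - dups[k] for k in dict.fromkeys(layout)}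
-- ===== Notes on version B (the rewrite author's own statement) =====
-- stated objective: alternative
-- what changed: A's single sequential scan carrying last_char and mutating the dict is replaced by a counting identity: after translating symbols and filtering to capitalized layout characters, each key's run count is computed as Counter(filtered)[k] minus Counter(adjacent equal pairs)[k], assembled in a dict comprehension over dict.fromkeys(layout).
import Mathlib
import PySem

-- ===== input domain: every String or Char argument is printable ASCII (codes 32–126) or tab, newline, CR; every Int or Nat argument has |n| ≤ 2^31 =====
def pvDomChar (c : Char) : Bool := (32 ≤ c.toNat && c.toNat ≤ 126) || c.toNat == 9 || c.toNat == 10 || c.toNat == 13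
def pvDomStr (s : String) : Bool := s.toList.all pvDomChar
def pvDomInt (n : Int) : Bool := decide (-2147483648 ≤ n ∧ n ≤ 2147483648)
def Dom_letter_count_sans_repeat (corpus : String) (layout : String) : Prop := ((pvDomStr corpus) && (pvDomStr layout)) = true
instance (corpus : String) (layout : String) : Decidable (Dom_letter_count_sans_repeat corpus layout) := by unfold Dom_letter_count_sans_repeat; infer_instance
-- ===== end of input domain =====

-- B replaces A's sequential last-char state machine by a counting identity:
-- runs of k = occurrences of k minus adjacent-equal pairs of k (two Counters and a
-- subtraction per key; objective: alternative algorithm, same cost).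


-- ===== PORT A =====
-- dict.fromkeys(layout, 0): keys are the single-character strings of layout, in order, value 0.
def lcsrFromKeys (layout : String) : PySem.Dict String Int :=
  layout.toList.foldl (fun d ch => d.insert (String.ofList [ch]) 0) PySem.Dict.empty

-- the body of A's `for character in corpus` loop; state = (char_dict, last_char).
-- `character.capitalize()` on a single ASCII char is `upperChar`; `cap_char in layout` is the
-- substring test; `char_dict[cap_char] += 1` is `modify` (the key is always present: the guard
-- puts cap_char's character in layout, hence among the fromkeys keys, so Python never raises).
def lcsrStepA (layout : String) (st : PySem.Dict String Int × String) (character : Char) :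
    PySem.Dict String Int × String :=
  let cap : String := String.ofList [PySem.Chars.upperChar character]
  if PySem.Chars.isIn cap.toList layout.toList then
    if cap ≠ st.2 then (st.1.modify cap 0 (· + 1), cap) else st
  else st

def letter_count_sans_repeat (corpus : String) (layout : String) : List (String × Int) :=
  let c1 := PySem.Str.replace corpus "\"" "'"
  let c2 := PySem.Str.replace c1 "<" "."
  let c3 := PySem.Str.replace c2 ">" "."
  let c4 := PySem.Str.replace c3 "{" "["
  let c5 := PySem.Str.replace c4 "}" "]"
  let c6 := PySem.Str.replace c5 "?" "/"
  let c7 := PySem.Str.replace c6 "+" "="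
  let c8 := PySem.Str.replace c7 "_" "-"
  let c9 := PySem.Str.replace c8 ":" ";"
  ((c9.toList.foldl (lcsrStepA layout) (lcsrFromKeys layout, "")).1).items

-- ===== PORT B =====
-- str.maketrans / translate table of Source B, as a character function.
def lcsrTrans (c : Char) : Char :=
  if c = '"' then '\'' else if c = '<' then '.' else if c = '>' then '.' else
  if c = '{' then '[' else if c = '}' then ']' else if c = '?' then '/' else
  if c = '+' then '=' else if c = '_' then '-' else if c = ':' then ';' else c

-- [c.capitalize() for c in … if c.capitalize() in layout]
def lcsrFiltered (layout : String) (cs : List Char) : List String :=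
  cs.filterMap (fun c =>
    let k : String := String.ofList [PySem.Chars.upperChar c]
    if PySem.Chars.isIn k.toList layout.toList then some k else none)

-- Counter(a for a, b in zip(filtered, filtered[1:]) if a == b), kept as the list it counts
def lcsrDups (filtered : List String) : List String :=
  (filtered.zip filtered.tail).filterMap (fun p => if p.1 = p.2 then some p.1 else none)

-- {k: total[k] - dups[k] for k in dict.fromkeys(layout)}: the comprehension's keys are the
-- deduplicated layout characters (as strings), so its items are exactly this map.
def letter_count_sans_repeat_alt (corpus : String) (layout : String) : List (String × Int) :=
  let filtered := lcsrFiltered layout (corpus.toList.map lcsrTrans)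
  let dups := lcsrDups filtered
  (PySem.List.dedup (layout.toList.map (fun c => String.ofList [c]))).map
    (fun k => (k, (filtered.count k : Int) - (dups.count k : Int)))

-- ===== PRECONDITION & SPEC =====
def Spec_letter_count_sans_repeat (corpus : String) (layout : String) (out : List (String × Int)) : Prop := out = letter_count_sans_repeat_alt corpus layout
instance (corpus : String) (layout : String) (out : List (String × Int)) : Decidable (Spec_letter_count_sans_repeat corpus layout out) := by unfold Spec_letter_count_sans_repeat; infer_instance

-- ===== CLAIM (what is proved, stated in full; the proofs are below) =====
def Claim_equal_letter_count_sans_repeat : Prop := ∀ (corpus : String) (layout : String), Dom_letter_count_sans_repeat corpus layout → Spec_letter_count_sans_repeat corpus layout (letter_count_sans_repeat corpus layout)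

-- ===== LEMMAS AND PROOFS =====

-- replacing a single character by a single character is a map over the characters
theorem lcsr_replace_go_single (a b : Char) :
    ∀ (l : List Char) (fuel : Nat) (acc : List Char), l.length ≤ fuel →
      PySem.Chars.replace.go [a] [b] fuel l acc =
        acc.reverse ++ l.map (fun c => if c = a then b else c) := by
  intro l
  induction l with
  | nil =>
    intro fuel acc _
    cases fuel <;> simp [PySem.Chars.replace.go]
  | cons c t ih =>
    intro fuel acc h
    cases fuel with
    | zero => simp at h
    | succ fuel =>
      by_cases hc : c = a
      · subst hc
        simp [PySem.Chars.replace.go, List.isPrefixOf, ih fuel (b :: acc) (by simpa using h)]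
      · have hac : ¬ a = c := fun h' => hc h'.symm
        simp [PySem.Chars.replace.go, List.isPrefixOf, hc, hac,
          ih fuel (c :: acc) (by simpa using h)]

theorem lcsr_replace_single (cs : List Char) (a b : Char) :
    PySem.Chars.replace cs [a] [b] = cs.map (fun c => if c = a then b else c) := by
  simpa [PySem.Chars.replace] using lcsr_replace_go_single a b cs cs.length [] le_rfl

-- the nine chained replacements of A equal one pass with B's translate table
theorem lcsr_chain_eq_map (corpus : String) :
    (PySem.Str.replace (PySem.Str.replace (PySem.Str.replace (PySem.Str.replace
      (PySem.Str.replace (PySem.Str.replace (PySem.Str.replace (PySem.Str.replace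
      (PySem.Str.replace corpus "\"" "'") "<" ".") ">" ".") "{" "[") "}" "]")
      "?" "/") "+" "=") "_" "-") ":" ";").toList = corpus.toList.map lcsrTrans := by
  simp only [PySem.Str.toList_replace,
    (by decide : ("\"" : String).toList = ['"']), (by decide : ("'" : String).toList = ['\'']),
    (by decide : ("<" : String).toList = ['<']), (by decide : (">" : String).toList = ['>']),
    (by decide : ("." : String).toList = ['.']), (by decide : ("{" : String).toList = ['{']),
    (by decide : ("}" : String).toList = ['}']), (by decide : ("[" : String).toList = ['[']),
    (by decide : ("]" : String).toList = [']']), (by decide : ("?" : String).toList = ['?']),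
    (by decide : ("/" : String).toList = ['/']), (by decide : ("+" : String).toList = ['+']),
    (by decide : ("=" : String).toList = ['=']), (by decide : ("_" : String).toList = ['_']),
    (by decide : ("-" : String).toList = ['-']), (by decide : (":" : String).toList = [':']),
    (by decide : (";" : String).toList = [';']),
    lcsr_replace_single, List.map_map]
  apply List.map_congr_left
  intro c _
  simp only [Function.comp_def]
  by_cases h1 : c = '"'
  · subst h1; decide
  by_cases h2 : c = '<'
  · subst h2; decide
  by_cases h3 : c = '>'
  · subst h3; decide
  by_cases h4 : c = '{'
  · subst h4; decide
  by_cases h5 : c = '}'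
  · subst h5; decide
  by_cases h6 : c = '?'
  · subst h6; decide
  by_cases h7 : c = '+'
  · subst h7; decide
  by_cases h8 : c = '_'
  · subst h8; decide
  by_cases h9 : c = ':'
  · subst h9; decide
  simp [lcsrTrans, h1, h2, h3, h4, h5, h6, h7, h8, h9]

-- the keys itertools-groupby style: one key per maximal run (proof-side description of A's loop)
def lcsrGroupKeys : Option String → List String → List String
  | _, [] => []
  | last, x :: xs => if some x = last then lcsrGroupKeys last xs else x :: lcsrGroupKeys (some x) xs

-- A's loop, started at any last_char, applies one modify per collapsed run of the filtered sequence
theorem lcsr_loop_eq (layout : String) :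
    ∀ (cs : List Char) (d : PySem.Dict String Int) (last : String),
      (cs.foldl (lcsrStepA layout) (d, last)).1 =
        (lcsrGroupKeys (some last) (lcsrFiltered layout cs)).foldl
          (fun d k => d.modify k 0 (· + 1)) d := by
  intro cs
  induction cs with
  | nil => intro d last; simp [lcsrFiltered, lcsrGroupKeys]
  | cons c t ih =>
    intro d last
    by_cases hin : PySem.Chars.isIn [PySem.Chars.upperChar c] layout.toList = true
    · by_cases hne : String.ofList [PySem.Chars.upperChar c] = last
      · simp [lcsrFiltered, lcsrGroupKeys, lcsrStepA, String.toList_ofList, hin, hne, ih]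
      · simp [lcsrFiltered, lcsrGroupKeys, lcsrStepA, String.toList_ofList, hin, hne, ih]
    · simp only [Bool.not_eq_true] at hin
      simp [lcsrFiltered, lcsrStepA, String.toList_ofList, hin, ih]

-- starting from last_char = "" is the same as starting fresh: no filtered element is ""
theorem lcsr_groupKeys_empty_start (xs : List String) (h : "" ∉ xs) :
    lcsrGroupKeys (some "") xs = lcsrGroupKeys none xs := by
  cases xs with
  | nil => rfl
  | cons x t =>
    have hx : x ≠ "" := by intro hx; exact h (hx ▸ List.mem_cons_self)
    simp [lcsrGroupKeys, hx]

theorem lcsr_filtered_ne_empty (layout : String) (cs : List Char) :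
    "" ∉ lcsrFiltered layout cs := by
  intro hmem
  simp only [lcsrFiltered, List.mem_filterMap] at hmem
  obtain ⟨c, -, hc⟩ := hmem
  split at hc
  · have h2 := congrArg String.toList (Option.some.inj hc)
    simp at h2
  · simp at hc

-- the counting identity: runs of k = occurrences of k − adjacent-equal pairs of k
theorem lcsr_count_from (k : String) :
    ∀ (xs : List String) (x : String),
      (lcsrGroupKeys (some x) xs).count k + (lcsrDups (x :: xs)).count k = xs.count k := by
  intro xs
  induction xs with
  | nil => intro x; simp [lcsrGroupKeys, lcsrDups]
  | cons y t ih =>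
    intro x
    have hd : lcsrDups (x :: y :: t) =
        (if x = y then [x] else []) ++ lcsrDups (y :: t) := by
      by_cases hxy : x = y <;> simp [lcsrDups, hxy]
    by_cases hxy : x = y
    · subst hxy
      have h1 : lcsrGroupKeys (some x) (x :: t) = lcsrGroupKeys (some x) t := by
        simp [lcsrGroupKeys]
      rw [h1, hd, if_pos rfl, List.count_append]
      have h2 := ih x
      by_cases hk : x = k
      · subst hk
        simp only [List.count_cons, beq_iff_eq, reduceIte, List.count_nil]
        omega
      · simp only [List.count_cons, List.count_nil, beq_iff_eq, hk, reduceIte]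
        omega
    · have hne : ¬ some y = some x := by simpa using Ne.symm hxy
      have h1 : lcsrGroupKeys (some x) (y :: t) = y :: lcsrGroupKeys (some y) t := by
        simp [lcsrGroupKeys, hne]
      rw [h1, hd, if_neg hxy, List.nil_append]
      have h2 := ih y
      by_cases hk : y = k
      · subst hk
        simp only [List.count_cons, beq_iff_eq, reduceIte]
        omega
      · simp only [List.count_cons, beq_iff_eq, hk, reduceIte]
        omega

theorem lcsr_count (k : String) (xs : List String) :
    (lcsrGroupKeys none xs).count k + (lcsrDups xs).count k = xs.count k := by
  cases xs with
  | nil => simp [lcsrGroupKeys, lcsrDups]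
  | cons y t =>
    have h1 : lcsrGroupKeys none (y :: t) = y :: lcsrGroupKeys (some y) t := by
      simp [lcsrGroupKeys]
    have h3 := lcsr_count_from k t y
    rw [h1]
    by_cases hk : y = k
    · subst hk
      simp only [List.count_cons, beq_iff_eq, reduceIte]
      omega
    · simp only [List.count_cons, beq_iff_eq, hk, reduceIte]
      omega

-- every value in fromkeys(layout, 0) is 0
theorem lcsr_fromKeys_getD_aux (k : String) :
    ∀ (l : List Char) (d : PySem.Dict String Int), d.getD k 0 = 0 →
      (l.foldl (fun d ch => d.insert (String.ofList [ch]) 0) d).getD k 0 = 0 := by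
  intro l
  induction l with
  | nil => intro d h; simpa using h
  | cons c t ih =>
    intro d h
    refine ih _ ?_
    rw [PySem.Dict.getD_insert]
    split <;> simp [h]

theorem lcsr_fromKeys_getD (layout : String) (k : String) :
    (lcsrFromKeys layout).getD k 0 = 0 :=
  lcsr_fromKeys_getD_aux k layout.toList PySem.Dict.empty (by simp [PySem.Dict.getD_empty])

-- keys of fromkeys(layout, 0), in order
theorem lcsr_fromKeys_keys (layout : String) :
    (lcsrFromKeys layout).keys =
      PySem.List.dedup (layout.toList.map (fun c => String.ofList [c])) := by
  rw [lcsrFromKeys, PySem.Dict.keys_foldl_insert_key (key := fun ch => String.ofList [ch])]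
  simp [PySem.Set.update_nil_left, PySem.List.dedup_eq_ofList, PySem.Dict.keys_empty]

theorem lcsr_fromKeys_nodup (layout : String) : (lcsrFromKeys layout).keys.Nodup := by
  rw [lcsr_fromKeys_keys]
  rw [PySem.List.dedup_eq_ofList]
  exact PySem.Set.nodup_ofList (layout.toList.map (fun c => String.ofList [c]))

-- every collapsed-run key comes from the filtered list…
theorem lcsr_groupKeys_subset (k : String) :
    ∀ (last : Option String) (xs : List String), k ∈ lcsrGroupKeys last xs → k ∈ xs := by
  intro last xs
  induction xs generalizing last with
  | nil => simp [lcsrGroupKeys]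
  | cons y t ih =>
    simp only [lcsrGroupKeys]
    split
    · exact fun h => List.mem_cons_of_mem _ (ih _ h)
    · intro h
      rcases List.mem_cons.mp h with h | h
      · exact h ▸ List.mem_cons_self
      · exact List.mem_cons_of_mem _ (ih _ h)

-- …and every filtered element is a key of fromkeys(layout, 0)
theorem lcsr_filtered_mem_keys (layout : String) (cs : List Char) (k : String)
    (h : k ∈ lcsrFiltered layout cs) : k ∈ (lcsrFromKeys layout).keys := by
  rw [lcsr_fromKeys_keys]
  simp only [lcsrFiltered, List.mem_filterMap] at h
  obtain ⟨c, -, hc⟩ := h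
  split at hc
  · rename_i hin
    obtain rfl := Option.some.inj hc
    rw [String.toList_ofList, PySem.Chars.isIn_iff_infix] at hin
    have hmemc : PySem.Chars.upperChar c ∈ layout.toList := by
      have := hin.subset
      simpa using this
    rw [PySem.List.dedup_eq_ofList]
    exact (PySem.Set.mem_ofList _ _).mpr (List.mem_map.mpr ⟨_, hmemc, rfl⟩)
  · simp at hc

-- the modify loop leaves the key list unchanged when every modified key is present
theorem lcsr_modify_keys (d : PySem.Dict String Int) (l : List String)
    (h : ∀ x ∈ l, x ∈ d.keys) :
    (l.foldl (fun d k => d.modify k 0 (· + 1)) d).keys = d.keys := by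
  rw [PySem.Dict.keys_foldl_modify, PySem.Set.update_eq_append_filter]
  have hnil : (PySem.Set.ofList l).filter (fun y => !(PySem.Set.contains d.keys y)) = [] := by
    rw [List.filter_eq_nil_iff]
    intro a ha
    have hmem : a ∈ d.keys := h a ((PySem.Set.mem_ofList _ _).mp ha)
    simp [hmem]
  rw [hnil, List.append_nil]

-- ===== VERDICT (by name: the statement is the Claim_ definition above) =====
theorem letter_count_sans_repeat_spec : Claim_equal_letter_count_sans_repeat := by
  intro corpus layout _
  unfold Spec_letter_count_sans_repeat letter_count_sans_repeat letter_count_sans_repeat_alt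
  simp only [lcsr_chain_eq_map, lcsr_loop_eq,
    lcsr_groupKeys_empty_start _ (lcsr_filtered_ne_empty layout _)]
  have hsub : ∀ x ∈ lcsrGroupKeys none (lcsrFiltered layout (corpus.toList.map lcsrTrans)),
      x ∈ (lcsrFromKeys layout).keys := fun x hx =>
    lcsr_filtered_mem_keys layout _ x (lcsr_groupKeys_subset x none _ hx)
  have hkeys := lcsr_modify_keys (lcsrFromKeys layout) _ hsub
  have hnodup : ((lcsrGroupKeys none (lcsrFiltered layout (corpus.toList.map lcsrTrans))).foldl
      (fun d k => d.modify k 0 (· + 1)) (lcsrFromKeys layout)).keys.Nodup := by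
    rw [hkeys]; exact lcsr_fromKeys_nodup layout
  rw [PySem.Dict.items_eq_map_keys _ hnodup 0, hkeys, lcsr_fromKeys_keys]
  apply List.map_congr_left
  intro k _
  rw [PySem.Dict.getD_foldl_modify_add_one, lcsr_fromKeys_getD]
  have hcount := lcsr_count k (lcsrFiltered layout (corpus.toList.map lcsrTrans))
  refine Prod.ext rfl ?_
  simp only
  omega
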